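-- pv_equiv track=rewrite | github.com/RamishSiddiqui/Expected-Grade-Calculator | ExpectedGradeCalculator/final/EGCWithCalc.py | TrucateString
-- ===== SOURCE A (Python) =====
-- def TrucateString(marks):
--     # ------------- removing all : and spaces from the string
--     marks = [line.strip().split("\n") for line in marks]  # make string list
--     marks = [item for sublist in marks for item in
--              sublist]  # above line make list of list thereefore converting it back to the list
--     for mytext, i in zip(marks, range(len(marks))):
--         mytext = mytext.replace(':', '')  # replacing all : into spaces
--         marks[i] = ' '.join([x for x in mytext.split(' ') if len(x) > 0])  # removing all extra spaces in the string.
--     return marks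
-- ===== SOURCE B (Python) =====
-- def _clean(text):
--     out = []
--     pending = False
--     for ch in text:
--         if ch == ':':
--             continue
--         if ch == ' ':
--             pending = True
--         else:
--             if pending and out:
--                 out.append(' ')
--             out.append(ch)
--             pending = False
--     return ''.join(out)
--
--
-- def TrucateString(marks):
--     return [_clean(piece) for line in marks for piece in line.strip().split("\n")]
-- ===== Notes on version B (the rewrite author's own statement) =====
-- stated objective: alternative
-- what changed: A normalizes each flattened piece with a multi-pass replace/split(' ')/filter/join pipeline inside an index-mutation loop; B does one single-pass character scan per piece (skip ':', collapse runs of spaces via a pending flag, trim at the edges) inside a flattening list comprehension.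
import Mathlib
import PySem

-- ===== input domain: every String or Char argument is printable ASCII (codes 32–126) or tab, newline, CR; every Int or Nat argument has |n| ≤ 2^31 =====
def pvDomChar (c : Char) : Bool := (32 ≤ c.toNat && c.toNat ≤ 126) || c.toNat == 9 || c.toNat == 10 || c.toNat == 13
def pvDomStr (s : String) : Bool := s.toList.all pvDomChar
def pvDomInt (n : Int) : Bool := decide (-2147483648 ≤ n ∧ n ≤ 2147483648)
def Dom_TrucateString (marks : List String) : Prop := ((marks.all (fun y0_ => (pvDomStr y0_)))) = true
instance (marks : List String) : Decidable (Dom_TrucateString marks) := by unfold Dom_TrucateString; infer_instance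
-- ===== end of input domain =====

-- B replaces A's replace/split/filter/join pipeline and index loop with a single-pass
-- character scanner per flattened piece (objective: alternative, same cost).

-- ===== PORT A =====
-- port of A; Chars.splitOn is the sep ≠ "" form of str.split (both separators here are literal non-empty strings)
def TrucateString (marks : List String) : List String :=
  let marks1 : List (List String) :=
    marks.map (fun line => (PySem.Chars.splitOn (PySem.Str.strip line).toList ['\n']).map String.ofList)
  let marks2 : List String := marks1.flatten
  marks2.map (fun mytext =>
    let mytext := PySem.Str.replace mytext ":" ""
    PySem.Str.join " " (((PySem.Chars.splitOn mytext.toList [' ']).map String.ofList).filter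
      (fun x => decide (0 < PySem.Str.len x))))

-- ===== PORT B =====
-- Source B's per-character loop body (out is the accumulated char list, pending the space flag)

def pvStep (st : List Char × Bool) (ch : Char) : List Char × Bool :=
  if ch = ':' then st
  else if ch = ' ' then (st.1, true)
  else ((if st.2 = true ∧ st.1 ≠ [] then st.1 ++ [' '] else st.1) ++ [ch], false)

-- _clean: fold the loop body over the characters; ''.join(out) = String.ofList
def pvClean (text : List Char) : String := String.ofList ((text.foldl pvStep ([], false)).1)

def TrucateString_alt (marks : List String) : List String :=
  marks.flatMap (fun line =>
    (PySem.Chars.splitOn (PySem.Str.strip line).toList ['\n']).map (fun piece => pvClean piece))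

-- ===== PRECONDITION & SPEC =====
def Spec_TrucateString (marks : List String) (out : List String) : Prop := out = TrucateString_alt marks
instance (marks : List String) (out : List String) : Decidable (Spec_TrucateString marks out) := by unfold Spec_TrucateString; infer_instance

-- ===== CLAIM (what is proved, stated in full; the proofs are below) =====
def Claim_equal_TrucateString : Prop := ∀ (marks : List String), Dom_TrucateString marks → Spec_TrucateString marks (TrucateString marks)

-- ===== LEMMAS AND PROOFS =====

theorem rep_go (fuel : Nat) (l acc : List Char) (h : l.length ≤ fuel) :
    PySem.Chars.replace.go [':'] [] fuel l acc = acc.reverse ++ l.filter (fun c => c != ':') := by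
  induction fuel generalizing l acc with
  | zero =>
    have : l = [] := by cases l <;> simp_all
    subst this; simp [PySem.Chars.replace.go]
  | succ n ih =>
    cases l with
    | nil => simp [PySem.Chars.replace.go]
    | cons c t =>
      have ht : t.length ≤ n := by simpa using Nat.le_of_succ_le_succ h
      by_cases hc : c = ':'
      · subst hc
        simp [PySem.Chars.replace.go, List.isPrefixOf, ih t acc ht]
      · simp [PySem.Chars.replace.go, List.isPrefixOf, Ne.symm hc, ih t (c :: acc) ht, hc]

theorem rep (l : List Char) : PySem.Chars.replace l [':'] [] = l.filter (fun c => c != ':') := by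
  simp [PySem.Chars.replace, rep_go l.length l []]

def splitSp (cur : List Char) : List Char → List (List Char)
  | [] => [cur]
  | c :: t => if c = ' ' then cur :: splitSp [] t else splitSp (cur ++ [c]) t

theorem splitSp_cons (l cur : List Char) :
    splitSp cur l = (cur ++ (splitSp [] l).headI) :: (splitSp [] l).tail := by
  induction l generalizing cur with
  | nil => simp [splitSp]
  | cons c t ih =>
    by_cases hc : c = ' '
    · subst hc; simp [splitSp]
    · simp only [splitSp, if_neg hc]
      rw [ih (cur ++ [c])]
      rw [show ([]:List Char) ++ [c] = [] ++ [c] from rfl, ih ([] ++ [c])]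
      simp

def pvWords (l : List Char) : List (List Char) := (splitSp [] l).filter (· ≠ [])

theorem join_cons (x : List Char) (xs : List (List Char)) :
    List.intercalate [' '] (x :: xs) =
      x ++ (if xs = [] then [] else ' ' :: List.intercalate [' '] xs) := by
  cases xs <;> simp [List.intercalate]

theorem tail_eq (ft : List Char) :
    (if pvWords ft = [] then []
     else (if ft.head? = some ' ' then [' '] else []) ++ List.intercalate [' '] (pvWords ft))
    = (splitSp [] ft).headI ++
        (if ((splitSp [] ft).tail).filter (· ≠ []) = [] then []
         else ' ' :: List.intercalate [' '] (((splitSp [] ft).tail).filter (· ≠ []))) := by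
  cases ft with
  | nil => simp [pvWords, splitSp]
  | cons d t2 =>
    by_cases hd : d = ' '
    · subst hd
      simp [pvWords, splitSp]
    · have h2 : splitSp [] (d :: t2) = ([d] ++ (splitSp [] t2).headI) :: (splitSp [] t2).tail := by
        simp only [splitSp, if_neg hd]
        exact splitSp_cons t2 ([] ++ [d])
      rw [show pvWords (d :: t2) = (([d] ++ (splitSp [] t2).headI) :: (splitSp [] t2).tail).filter (· ≠ []) from by rw [pvWords, h2], h2]
      simp [join_cons, hd]

theorem main_inv (m : List Char) (out : List Char) (pending : Bool) :
    (m.foldl pvStep (out, pending)).1 =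
      out ++
        (if pvWords (m.filter (fun c => c != ':')) = [] then []
         else
           (if out ≠ [] ∧ (pending = true ∨ (m.filter (fun c => c != ':')).head? = some ' ') then [' '] else []) ++
             List.intercalate [' '] (pvWords (m.filter (fun c => c != ':')))) := by
  induction m generalizing out pending with
  | nil => simp [pvWords, splitSp]
  | cons c t ih =>
    by_cases hcol : c = ':'
    · subst hcol
      have e0 : pvStep (out, pending) ':' = (out, pending) := by simp [pvStep]
      rw [List.foldl_cons, e0, ih out pending]
      simp
    · by_cases hsp : c = ' '
      · subst hsp
        have e1 : pvStep (out, pending) ' ' = (out, true) := by simp [pvStep]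
        rw [List.foldl_cons, e1, ih out true]
        have hfc : (' ' :: t).filter (fun c => c != ':') = ' ' :: t.filter (fun c => c != ':') := by
          simp
        rw [hfc]
        have hw : pvWords (' ' :: t.filter (fun c => c != ':')) = pvWords (t.filter (fun c => c != ':')) := by
          simp [pvWords, splitSp]
        rw [hw]
        by_cases ho : out = [] <;> simp [ho]
      · have e2 : pvStep (out, pending) c =
            ((if pending = true ∧ out ≠ [] then out ++ [' '] else out) ++ [c], false) := by
          simp [pvStep, hcol, hsp]
        rw [List.foldl_cons, e2, ih _ false]
        have hfc : (c :: t).filter (fun c => c != ':') = c :: t.filter (fun c => c != ':') := by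
          simp [hcol]
        rw [hfc]
        set ft := t.filter (fun c => c != ':') with hft
        have hpadc : ((if pending = true ∧ out ≠ [] then out ++ [' '] else out) ++ [c]) ≠ [] := by simp
        have hsplit : splitSp [] (c :: ft) = ([c] ++ (splitSp [] ft).headI) :: (splitSp [] ft).tail := by
          simp only [splitSp, if_neg hsp]
          exact splitSp_cons ft ([] ++ [c])
        simp only [hpadc, ne_eq, not_false_eq_true, true_and, Bool.false_eq_true, false_or]
        rw [tail_eq ft]
        rw [show pvWords (c :: ft) = (([c] ++ (splitSp [] ft).headI) :: (splitSp [] ft).tail).filter (· ≠ []) from by rw [pvWords, hsplit]]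
        have h1 : (([c] ++ (splitSp [] ft).headI) ≠ []) := by simp
        by_cases hp : pending = true ∧ out ≠ []
        · simp [join_cons, hp]
        · have hp' : ¬(¬out = [] ∧ pending = true) := fun h => hp ⟨h.2, h.1⟩
          simp [join_cons, hp]
          intro ho
          refine ⟨?_, hsp⟩
          cases pending with
          | false => rfl
          | true => exact absurd ⟨rfl, ho⟩ hp

theorem split_go (fuel : Nat) (l cur : List Char) (acc : List (List Char)) (h : l.length ≤ fuel) :
    PySem.Chars.splitOn.go [' '] fuel l cur acc = acc.reverse ++ splitSp cur.reverse l := by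
  induction fuel generalizing l cur acc with
  | zero =>
    have : l = [] := by cases l <;> simp_all
    subst this; simp [PySem.Chars.splitOn.go, splitSp]
  | succ n ih =>
    cases l with
    | nil => simp [PySem.Chars.splitOn.go, splitSp]
    | cons c t =>
      have ht : t.length ≤ n := by simpa using Nat.le_of_succ_le_succ h
      by_cases hc : c = ' '
      · subst hc
        simp [PySem.Chars.splitOn.go, List.isPrefixOf, ih t [] (cur.reverse :: acc) ht, splitSp]
      · simp only [PySem.Chars.splitOn.go, List.isPrefixOf, splitSp]
        simp [Ne.symm hc, ih t (c :: cur) acc ht, hc]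

theorem splitOn_sp (l : List Char) : PySem.Chars.splitOn l [' '] = splitSp [] l := by
  simpa using split_go (l.length + 1) l [] [] (by omega)

-- the per-piece equality: A's replace/split/filter/join pipeline = B's scanner
theorem piece_eq (cs : List Char) :
    PySem.Str.join " "
      (((PySem.Chars.splitOn (PySem.Str.replace (String.ofList cs) ":" "").toList [' ']).map String.ofList).filter
        (fun x => decide (0 < PySem.Str.len x))) = pvClean cs := by
  have h0 : (PySem.Str.replace (String.ofList cs) ":" "").toList = cs.filter (fun c => c != ':') := by
    rw [PySem.Str.toList_replace]
    simpa using rep cs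
  rw [h0, splitOn_sp]
  have hfm : ((splitSp [] (cs.filter (fun c => c != ':'))).map String.ofList).filter
      (fun x => decide (0 < PySem.Str.len x))
      = (pvWords (cs.filter (fun c => c != ':'))).map String.ofList := by
    rw [pvWords, List.filter_map]
    congr 1
    apply List.filter_congr
    intro w _
    simp [PySem.Str.len_eq, List.length_pos_iff]
  rw [hfm]
  apply String.toList_inj.mp
  rw [PySem.Str.toList_join, List.map_map]
  have hcomp : (pvWords (cs.filter (fun c => c != ':'))).map (String.toList ∘ String.ofList)
      = pvWords (cs.filter (fun c => c != ':')) := by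
    simp [Function.comp_def]
  rw [hcomp]
  show List.intercalate [' '] _ = _
  rw [pvClean]
  simp only [String.toList_ofList]
  rw [main_inv (cs) [] false]
  cases hw : pvWords (cs.filter (fun c => c != ':')) with
  | nil => simp [List.intercalate]
  | cons x xs => simp

-- ===== VERDICT (by name: the statement is the Claim_ definition above) =====
theorem TrucateString_spec : Claim_equal_TrucateString := by
  intro marks _
  show TrucateString marks = TrucateString_alt marks
  simp only [TrucateString, TrucateString_alt]
  rw [List.flatMap_def, List.map_flatten, List.map_map]
  exact congrArg List.flatten (List.map_congr_left (fun line _ => by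
    simp only [Function.comp_def, List.map_map]
    exact List.map_congr_left (fun piece _ => piece_eq piece)))
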